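-- pv_equiv track=rewrite | github.com/FranceRafaelSalacut/142_whats_D_Tea | Salacut_MP2-1_V2.py | var_name
-- ===== SOURCE A (Python) =====
-- def var_name(str:str):
--     temp = ""
--     space = 0
--     for char in str:
--         if char == "+":
--             space+=1
--         if char == " ":
--             if temp.strip() and not space:
--                 break
--             elif space > 0:
--                 space-=1
--         temp = char + temp
--     return temp
-- ===== SOURCE B (Python) =====
-- def var_name(str):
--     # Phase 1: find the first non-whitespace character (before it, A's loop
--     # cannot break and never touches the counter, since '+' is non-whitespace).
--     j = next((k for k, c in enumerate(str) if not c.isspace()), None)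
--     if j is None:
--         return str[::-1]
--     # Phase 2: the loop breaks at the first ' ' where the running number of
--     # '+' seen equals the number of ' ' already consumed; otherwise the whole
--     # string is kept.  One slice + one reversal at the end.
--     tail = str[j:]
--     cut = len(tail)
--     plus = 0
--     sp = 0
--     for k, c in enumerate(tail):
--         if c == ' ' and plus == sp:
--             cut = k
--             break
--         if c == '+':
--             plus += 1
--         elif c == ' ':
--             sp += 1
--     return str[:j + cut][::-1]
-- ===== Notes on version B (the rewrite author's own statement) =====
-- stated objective: faster
-- what changed: Replaces the per-character string prepend and per-character temp.strip() rescan with a two-phase linear scan: first find the first non-whitespace index, then track only the plus/space count difference to locate the cut point, and build the result with a single slice and reversal.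
import Mathlib
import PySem

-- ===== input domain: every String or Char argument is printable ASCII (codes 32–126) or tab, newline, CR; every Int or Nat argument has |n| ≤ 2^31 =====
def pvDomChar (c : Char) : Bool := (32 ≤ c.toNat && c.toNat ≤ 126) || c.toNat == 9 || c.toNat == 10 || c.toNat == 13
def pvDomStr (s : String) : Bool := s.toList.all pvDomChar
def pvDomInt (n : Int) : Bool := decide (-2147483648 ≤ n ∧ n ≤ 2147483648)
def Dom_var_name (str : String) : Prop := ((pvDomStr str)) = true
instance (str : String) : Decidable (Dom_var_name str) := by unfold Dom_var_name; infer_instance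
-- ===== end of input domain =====

-- B replaces A's quadratic prepend-and-strip loop by a linear two-phase scan with one
-- final slice/reversal (objective: faster).

-- ===== PORT A =====
-- A's loop: prepend each char to temp; '+' bumps the counter; a ' ' breaks when
-- temp.strip() is truthy and the counter is zero, else consumes a counter credit.
def var_name_go : List Char → List Char → Int → List Char
  | [], temp, _ => temp
  | c :: rest, temp, space =>
    let space := if c == '+' then space + 1 else space
    if c == ' ' then
      if !(PySem.Chars.strip temp).isEmpty && space == 0 then temp
      else
        let space := if space > 0 then space - 1 else space
        var_name_go rest (c :: temp) space
    else
      var_name_go rest (c :: temp) space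

def var_name (str : String) : String := String.mk (var_name_go str.toList [] 0)

-- ===== PORT B =====
-- index of the first non-whitespace character (Source B's `next(... enumerate ...)`)
def var_name_findJ : List Char → Option Nat
  | [] => none
  | c :: rest => if PySem.Chars.isspace c then (var_name_findJ rest).map (· + 1) else some 0

-- Source B's phase-2 loop: break index of the first ' ' with plus == sp, none if no break
def var_name_scan : List Char → Int → Int → Option Nat
  | [], _, _ => none
  | c :: rest, plus, sp =>
    if c == ' ' && plus == sp then some 0
    else (var_name_scan rest (if c == '+' then plus + 1 else plus)
            (if c == ' ' then sp + 1 else sp)).map (· + 1)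

def var_name_alt (str : String) : String :=
  let cs := str.toList
  match var_name_findJ cs with
  | none => String.mk cs.reverse
  | some j =>
    let tail := cs.drop j
    let cut := (var_name_scan tail 0 0).getD tail.length
    String.mk ((cs.take (j + cut)).reverse)

-- ===== PRECONDITION & SPEC =====
def Spec_var_name (str : String) (out : String) : Prop := out = var_name_alt str
instance (str : String) (out : String) : Decidable (Spec_var_name str out) := by unfold Spec_var_name; infer_instance

-- ===== CLAIM (what is proved, stated in full; the proofs are below) =====
def Claim_equal_var_name : Prop := ∀ (str : String), Dom_var_name str → Spec_var_name str (var_name str)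

-- ===== LEMMAS AND PROOFS =====

-- single-difference version of B's phase-2 scan (only plus - sp matters)
def var_name_scan1 : List Char → Int → Option Nat
  | [], _ => none
  | c :: rest, d =>
    if c == ' ' && d == 0 then some 0
    else (var_name_scan1 rest
            (if c == '+' then d + 1 else if c == ' ' then d - 1 else d)).map (· + 1)

theorem scan_eq_scan1 : ∀ (l : List Char) (plus sp : Int),
    var_name_scan l plus sp = var_name_scan1 l (plus - sp) := by
  intro l
  induction l with
  | nil => intro _ _; rfl
  | cons c rest ih =>
    intro plus sp
    have hb : (plus == sp) = (plus - sp == 0) := by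
      by_cases h : plus = sp
      · subst h; simp
      · simp [h, show plus - sp ≠ 0 by omega]
    simp only [var_name_scan, var_name_scan1, hb]
    by_cases hbr : (c == ' ' && (plus - sp == 0)) = true
    · simp [hbr]
    · rw [if_neg hbr, if_neg hbr, ih]
      congr 2
      by_cases hp : c = '+'
      · subst hp
        simp only [BEq.rfl, if_true, show ('+' == ' ') = false by decide,
          Bool.false_eq_true, if_false]
        omega
      · by_cases hsp : c = ' '
        · subst hsp
          simp only [show (' ' == '+') = false by decide, Bool.false_eq_true,
            if_false, BEq.rfl, if_true]
          omega
        · simp [hp, hsp]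

theorem strip_eq_nil_iff (cs : List Char) :
    (PySem.Chars.strip cs = []) ↔ ∀ x ∈ cs, PySem.Chars.isspace x = true := by
  simp only [PySem.Chars.strip, PySem.Chars.lstrip, PySem.Chars.rstrip,
    List.reverse_eq_nil_iff, List.dropWhile_eq_nil_iff, List.mem_reverse]
  constructor
  · intro h x hx
    rw [← List.takeWhile_append_dropWhile (p := PySem.Chars.isspace) (l := cs)] at hx
    rcases List.mem_append.1 hx with h1 | h2
    · exact List.mem_takeWhile_imp h1
    · exact h x h2
  · intro h x hx
    exact h x (List.dropWhile_subset _ hx)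

theorem getD_map_succ (o : Option Nat) (n : Nat) :
    (o.map (· + 1)).getD (n + 1) = o.getD n + 1 := by cases o <;> rfl

-- phase 2: once temp contains a non-whitespace char, A's counter tracks scan1's diff
theorem phase2 : ∀ (l temp : List Char) (space : Int),
    (∃ x ∈ temp, PySem.Chars.isspace x = false) → 0 ≤ space →
    var_name_go l temp space
      = (l.take ((var_name_scan1 l space).getD l.length)).reverse ++ temp := by
  intro l
  induction l with
  | nil => intro temp space _ _; simp [var_name_go, var_name_scan1]
  | cons c rest ih =>
    intro temp space hnw hs
    have hstrip : PySem.Chars.strip temp ≠ [] := by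
      intro h
      rcases hnw with ⟨x, hx, hxf⟩
      rw [(strip_eq_nil_iff temp).mp h x hx] at hxf
      cases hxf
    have hstripb : (PySem.Chars.strip temp).isEmpty = false := by
      cases h : (PySem.Chars.strip temp).isEmpty
      · rfl
      · exact absurd (List.isEmpty_iff.mp h) hstrip
    have hnw' : ∃ x ∈ c :: temp, PySem.Chars.isspace x = false := by
      rcases hnw with ⟨x, hx, hxf⟩; exact ⟨x, List.mem_cons_of_mem _ hx, hxf⟩
    by_cases hsp : c = ' '
    · subst hsp
      by_cases hz : space = 0
      · subst hz
        simp [var_name_go, var_name_scan1, hstripb]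
      · have hpos : 0 < space := by omega
        have h0 : (space == 0) = false := by simp [hz]
        have hgo : var_name_go (' ' :: rest) temp space
            = var_name_go rest (' ' :: temp) (space - 1) := by
          simp [var_name_go, hstripb, h0, hpos]
        have hscan : var_name_scan1 (' ' :: rest) space
            = (var_name_scan1 rest (space - 1)).map (· + 1) := by
          simp [var_name_scan1, h0]
        rw [hgo, hscan, ih (' ' :: temp) (space - 1) hnw' (by omega)]
        simp only [List.length_cons, getD_map_succ]
        simp [List.take_succ_cons, List.append_assoc]
    · have hc : (c == ' ') = false := by simp [hsp]
      have hd : (if c == '+' then space + 1 else if c == ' ' then space - 1 else space)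
          = (if c == '+' then space + 1 else space) := by
        by_cases hp : c = '+' <;> simp [hp, hc]
      have hgo : var_name_go (c :: rest) temp space
          = var_name_go rest (c :: temp) (if c == '+' then space + 1 else space) := by
        simp [var_name_go, hc]
      have hscan : var_name_scan1 (c :: rest) space
          = (var_name_scan1 rest (if c == '+' then space + 1 else space)).map (· + 1) := by
        simp only [var_name_scan1, hc, Bool.false_and, Bool.false_eq_true, if_false, hd]
      rw [hgo, hscan,
        ih (c :: temp) _ hnw' (by by_cases hp : c = '+' <;> simp [hp] <;> omega)]
      simp only [List.length_cons, getD_map_succ]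
      simp [List.take_succ_cons, List.append_assoc]

-- phase 1: while temp is all-whitespace the counter stays 0 and no break can fire
theorem phase1 : ∀ (l temp : List Char),
    (∀ x ∈ temp, PySem.Chars.isspace x = true) →
    var_name_go l temp 0
      = (l.take (match var_name_findJ l with
          | none => l.length
          | some j => j + (var_name_scan1 (l.drop j) 0).getD (l.drop j).length)).reverse
        ++ temp := by
  intro l
  induction l with
  | nil => intro temp _; simp [var_name_go, var_name_findJ]
  | cons c rest ih =>
    intro temp hws
    by_cases hwsc : PySem.Chars.isspace c = true
    · -- c is whitespace: no break, counter untouched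
      have hws' : ∀ x ∈ c :: temp, PySem.Chars.isspace x = true := by
        intro x hx
        rcases List.mem_cons.1 hx with h | h
        · subst h; exact hwsc
        · exact hws x h
      have hplus : (c == '+') = false := by
        cases h : (c == '+')
        · rfl
        · exfalso; rw [beq_iff_eq] at h; subst h; exact absurd hwsc (by decide)
      have hstrip : PySem.Chars.strip temp = [] := (strip_eq_nil_iff temp).mpr hws
      have hstripb : (PySem.Chars.strip temp).isEmpty = true := by
        rw [hstrip]; rfl
      have hstep : var_name_go (c :: rest) temp 0 = var_name_go rest (c :: temp) 0 := by
        by_cases hsp : c = ' '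
        · subst hsp
          simp [var_name_go, hstripb]
        · have hc : (c == ' ') = false := by simp [hsp]
          simp [var_name_go, hplus, hc]
      have hfind : var_name_findJ (c :: rest) = (var_name_findJ rest).map (· + 1) := by
        simp [var_name_findJ, hwsc]
      rw [hstep, ih (c :: temp) hws', hfind]
      cases hfj : var_name_findJ rest with
      | none =>
        simp [List.append_assoc]
      | some j =>
        simp only [Option.map_some, List.drop_succ_cons]
        rw [show j + 1 + (var_name_scan1 (rest.drop j) 0).getD (rest.drop j).length
            = (j + (var_name_scan1 (rest.drop j) 0).getD (rest.drop j).length) + 1 by omega]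
        simp [List.take_succ_cons, List.append_assoc]
    · -- c is the first non-whitespace char: hand over to phase 2 including c
      have hwsb : PySem.Chars.isspace c = false := by
        cases h : PySem.Chars.isspace c
        · rfl
        · exact absurd h hwsc
      have hsp : c ≠ ' ' := by
        intro h; subst h; exact absurd hwsb (by decide)
      have hc : (c == ' ') = false := by simp [hsp]
      have hnw : ∃ x ∈ c :: temp, PySem.Chars.isspace x = false :=
        ⟨c, List.mem_cons_self, hwsb⟩
      have hstep : var_name_go (c :: rest) temp 0
          = var_name_go rest (c :: temp) (if c == '+' then (0 : Int) + 1 else 0) := by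
        simp [var_name_go, hc]
      have hfind : var_name_findJ (c :: rest) = some 0 := by
        simp [var_name_findJ, hwsb]
      rw [hstep,
        phase2 rest (c :: temp) _ hnw (by by_cases hp : c = '+' <;> simp [hp]),
        hfind]
      have hscan : var_name_scan1 (c :: rest) 0
          = (var_name_scan1 rest (if c == '+' then (0 : Int) + 1 else 0)).map (· + 1) := by
        simp only [var_name_scan1, hc, Bool.false_and, Bool.false_eq_true, if_false]
      simp only [List.drop_zero, Nat.zero_add, hscan, List.length_cons, getD_map_succ]
      simp [List.take_succ_cons, List.append_assoc]

-- ===== VERDICT (by name: the statement is the Claim_ definition above) =====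
theorem var_name_spec : Claim_equal_var_name := by
  unfold Claim_equal_var_name Spec_var_name
  intro str _
  unfold var_name var_name_alt
  rw [phase1 str.toList [] (by intro x hx; cases hx)]
  cases hfj : var_name_findJ str.toList with
  | none =>
    simp only [hfj]
    rw [List.take_length, List.append_nil]
  | some j =>
    simp only [hfj, List.append_nil, scan_eq_scan1, List.length_drop]
    norm_num
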